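-- pv_equiv track=rewrite | github.com/kriskowal/3rin.gs | articles.py | term_html
-- ===== SOURCE A (Python) =====
-- def term_html(term):
--     return " &#47; ".join(
--         " &ndash; ".join(
--             " &ndash; ".join(
--                 " &rarr; ".join(
--                     " &larr; ".join(
--                         "&#8275;".join(
--                             words_html(words)
--                             for words in tilde.split("~")
--                         ) for tilde in rarr.split(" < ")
--                     ) for rarr in ndash.split(" > ")
--                 ) for ndash in mdash.split(" - ")
--             ) for mdash in solidus.split(" -- ")
--         ) for solidus in term.split(" / ")
--     )
--
-- def words_html(words):
--     return " ".join(
--         word_html(word)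
--         for word in
--         words.split(" ")
--     )
--
-- def word_html(word):
--     if word.startswith("http://"):
--         return '<a href="%s" target="_blank">&dagger;</a>' % word
--     if word in LANGUAGE_ABBRS:
--         return language_abbr_html(word)
--     return word
--
-- LANGUAGE_ABBRS = {
--     "E": "English",
--     "S": "Sindarin",
--     "Q": "Quenya",
--     "Ñ": "Ñoldorin",
--     "W": "Westron",
--     "R": "Rohirric",
-- }
--
-- LANGUAGE_ABBRS_NORMAL = {
--     "N": "Ñ",
-- }
--
-- def language_abbr_html(language):
--     language = LANGUAGE_ABBRS_NORMAL.get(language, language)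
--     return """<em><abbr title="%s">%s</abbr></em>""" % (
--         LANGUAGE_ABBRS.get(language, language),
--         language
--     )
-- ===== SOURCE B (Python) =====
-- LANGUAGE_ABBRS = {
--     "E": "English",
--     "S": "Sindarin",
--     "Q": "Quenya",
--     "Ñ": "Ñoldorin",
--     "W": "Westron",
--     "R": "Rohirric",
-- }
--
-- LEVELS = [
--     (" / ", " &#47; "),
--     (" -- ", " &ndash; "),
--     (" - ", " &ndash; "),
--     (" > ", " &rarr; "),
--     (" < ", " &larr; "),
--     ("~", "&#8275;"),
-- ]
--
-- def word_html(word):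
--     if word.startswith("http://"):
--         return '<a href="%s" target="_blank">&dagger;</a>' % word
--     full = LANGUAGE_ABBRS.get(word)
--     if full is not None:
--         return '<em><abbr title="%s">%s</abbr></em>' % (full, word)
--     return word
--
-- def term_html(term):
--     def rec(s, i):
--         if i == len(LEVELS):
--             return " ".join(word_html(w) for w in s.split(" "))
--         split, join = LEVELS[i]
--         return join.join(rec(part, i + 1) for part in s.split(split))
--     return rec(term, 0)
-- ===== Notes on version B (the rewrite author's own statement) =====
-- stated objective: simpler
-- what changed: Replaces the six statically-nested generator comprehensions with one recursion over a table of (split, join) delimiter pairs, and inlines the abbreviation lookup into a single dict.get instead of contains-then-normalise-then-get.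
import Mathlib
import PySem

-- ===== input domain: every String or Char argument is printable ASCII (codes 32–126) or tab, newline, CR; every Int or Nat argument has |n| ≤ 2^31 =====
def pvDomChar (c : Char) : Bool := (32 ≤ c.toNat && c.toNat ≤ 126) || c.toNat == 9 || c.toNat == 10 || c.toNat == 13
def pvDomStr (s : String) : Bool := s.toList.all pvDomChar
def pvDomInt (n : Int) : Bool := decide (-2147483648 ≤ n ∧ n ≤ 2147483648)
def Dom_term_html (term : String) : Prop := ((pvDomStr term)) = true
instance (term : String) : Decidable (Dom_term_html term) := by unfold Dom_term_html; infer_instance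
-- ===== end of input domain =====

-- B replaces the six statically-nested comprehensions by one recursion over a table of
-- (split, join) delimiter pairs (objective: simpler).

-- shared split primitive: Python s.split(sep) for a NON-EMPTY separator (exact; PySem.Chars.splitOn)
def pySplit (s sep : String) : List String :=
  (PySem.Chars.splitOn s.toList sep.toList).map String.ofList

-- ===== PORT A =====
def LANGUAGE_ABBRS_A : PySem.Dict String String :=
  PySem.Dict.ofList [("E", "English"), ("S", "Sindarin"), ("Q", "Quenya"),
                     ("Ñ", "Ñoldorin"), ("W", "Westron"), ("R", "Rohirric")]

def LANGUAGE_ABBRS_NORMAL_A : PySem.Dict String String :=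
  PySem.Dict.ofList [("N", "Ñ")]

def language_abbr_html_A (language : String) : String :=
  let language := LANGUAGE_ABBRS_NORMAL_A.getD language language
  "<em><abbr title=\"" ++ LANGUAGE_ABBRS_A.getD language language ++ "\">" ++ language ++ "</abbr></em>"

def word_html_A (word : String) : String :=
  if PySem.Str.startswith word "http://" then
    "<a href=\"" ++ word ++ "\" target=\"_blank\">&dagger;</a>"
  else if LANGUAGE_ABBRS_A.contains word then
    language_abbr_html_A word
  else
    word

def words_html_A (words : String) : String :=
  PySem.Str.join " " ((pySplit words " ").map word_html_A)

def term_html (term : String) : String :=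
  PySem.Str.join " &#47; " ((pySplit term " / ").map (fun solidus =>
    PySem.Str.join " &ndash; " ((pySplit solidus " -- ").map (fun mdash =>
      PySem.Str.join " &ndash; " ((pySplit mdash " - ").map (fun ndash =>
        PySem.Str.join " &rarr; " ((pySplit ndash " > ").map (fun rarr =>
          PySem.Str.join " &larr; " ((pySplit rarr " < ").map (fun tilde =>
            PySem.Str.join "&#8275;" ((pySplit tilde "~").map words_html_A)))))))))))

-- ===== PORT B =====
def LANGUAGE_ABBRS_B : PySem.Dict String String :=
  PySem.Dict.ofList [("E", "English"), ("S", "Sindarin"), ("Q", "Quenya"),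
                     ("Ñ", "Ñoldorin"), ("W", "Westron"), ("R", "Rohirric")]

def LEVELS_B : List (String × String) :=
  [(" / ", " &#47; "), (" -- ", " &ndash; "), (" - ", " &ndash; "),
   (" > ", " &rarr; "), (" < ", " &larr; "), ("~", "&#8275;")]

def word_html_B (word : String) : String :=
  if PySem.Str.startswith word "http://" then
    "<a href=\"" ++ word ++ "\" target=\"_blank\">&dagger;</a>"
  else
    match LANGUAGE_ABBRS_B.get? word with
    | some full => "<em><abbr title=\"" ++ full ++ "\">" ++ word ++ "</abbr></em>"
    | none => word

def rec_html_B : List (String × String) → String → String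
  | [], s => PySem.Str.join " " ((pySplit s " ").map word_html_B)
  | (split, join) :: rest, s =>
      PySem.Str.join join ((pySplit s split).map (rec_html_B rest))

def term_html_alt (term : String) : String := rec_html_B LEVELS_B term

-- ===== PRECONDITION & SPEC =====
def Spec_term_html (term : String) (out : String) : Prop := out = term_html_alt term
instance (term : String) (out : String) : Decidable (Spec_term_html term out) := by unfold Spec_term_html; infer_instance

-- ===== CLAIM (what is proved, stated in full; the proofs are below) =====
def Claim_equal_term_html : Prop := ∀ (term : String), Dom_term_html term → Spec_term_html term (term_html term)

-- ===== LEMMAS AND PROOFS =====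
theorem word_html_eq (w : String) : word_html_A w = word_html_B w := by
  unfold word_html_A word_html_B language_abbr_html_A
  by_cases hh : PySem.Chars.startswith w.toList ['h', 't', 't', 'p', ':', '/', '/'] = true
  · simp [hh]
  · by_cases hE : w = "E"
    · subst hE; rfl
    · by_cases hS : w = "S"
      · subst hS; rfl
      · by_cases hQ : w = "Q"
        · subst hQ; rfl
        · by_cases hN : w = "Ñ"
          · subst hN; rfl
          · by_cases hW : w = "W"
            · subst hW; rfl
            · by_cases hR : w = "R"
              · subst hR; rfl
              · have hA : LANGUAGE_ABBRS_A = PySem.Dict.mk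
                    [("E", "English"), ("S", "Sindarin"), ("Q", "Quenya"),
                     ("Ñ", "Ñoldorin"), ("W", "Westron"), ("R", "Rohirric")] := by decide
                have hB : LANGUAGE_ABBRS_B = PySem.Dict.mk
                    [("E", "English"), ("S", "Sindarin"), ("Q", "Quenya"),
                     ("Ñ", "Ñoldorin"), ("W", "Westron"), ("R", "Rohirric")] := by decide
                rw [hA, hB]
                simp [hh, Ne.symm hE, Ne.symm hS, Ne.symm hQ, Ne.symm hN,
                      Ne.symm hW, Ne.symm hR, PySem.Dict.get?]

theorem term_html_eq (term : String) : term_html term = term_html_alt term := by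
  have hw : words_html_A = fun s => PySem.Str.join " " ((pySplit s " ").map word_html_B) :=
    funext (fun s => by rw [words_html_A, funext word_html_eq])
  unfold term_html term_html_alt LEVELS_B
  simp [rec_html_B, hw]

-- ===== VERDICT (by name: the statement is the Claim_ definition above) =====
theorem term_html_spec : Claim_equal_term_html := by
  intro term _
  unfold Spec_term_html
  exact term_html_eq term
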